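-- pv_equiv track=rewrite | github.com/tehepix2/CS100 | lecturenotes/dictionary.py | lengthStats
-- ===== SOURCE A (Python) =====
-- def lengthStats(text):
--     dictionary = {}
--     for word in text.split():
--         if len(word) in dictionary.keys():
--             dictionary[len(word)] += 1
--         else:
--             dictionary[len(word)] = 1
--     return dictionary
-- ===== SOURCE B (Python) =====
-- def lengthStats(text):
--     lengths = [len(w) for w in text.split()]
--     return {n: lengths.count(n) for n in dict.fromkeys(lengths)}
-- ===== Notes on version B (the rewrite author's own statement) =====
-- stated objective: simpler
-- what changed: Replaces the per-word membership-test-and-increment loop on a dict with building the list of word lengths once and a dict comprehension over its first-occurrence dedup, each key's value computed directly as lengths.count(n).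
import Mathlib
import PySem

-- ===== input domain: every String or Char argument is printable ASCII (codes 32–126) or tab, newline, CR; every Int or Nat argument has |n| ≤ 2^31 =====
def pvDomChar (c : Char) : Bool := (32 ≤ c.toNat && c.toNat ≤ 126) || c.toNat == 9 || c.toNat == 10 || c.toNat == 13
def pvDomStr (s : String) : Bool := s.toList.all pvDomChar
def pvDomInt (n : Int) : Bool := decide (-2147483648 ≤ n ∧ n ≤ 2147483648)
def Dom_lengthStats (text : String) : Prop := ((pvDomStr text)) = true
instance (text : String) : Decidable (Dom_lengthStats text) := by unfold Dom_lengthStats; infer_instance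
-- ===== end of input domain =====

-- B replaces A's membership-test-and-increment dict loop with a dict comprehension
-- over the deduped length list, computing each count directly (objective: simpler).

-- ===== PORT A =====
def lengthStats (text : String) : List (Int × Int) :=
  ((PySem.Str.split₀ text).foldl
    (fun d w =>
      if d.contains (PySem.Str.len w) then
        d.insert (PySem.Str.len w) (d.getD (PySem.Str.len w) 0 + 1)
      else
        d.insert (PySem.Str.len w) 1)
    (PySem.Dict.empty : PySem.Dict Int Int)).items

-- ===== PORT B =====
def lengthStats_alt (text : String) : List (Int × Int) :=
  let lengths : List Int := (PySem.Str.split₀ text).map (fun w => PySem.Str.len w)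
  ((PySem.List.dedup lengths).foldl
    (fun d n => d.insert n ((PySem.List.count lengths n : Int)))
    (PySem.Dict.empty : PySem.Dict Int Int)).items

-- ===== PRECONDITION & SPEC =====
def Spec_lengthStats (text : String) (out : List (Int × Int)) : Prop := out = lengthStats_alt text
instance (text : String) (out : List (Int × Int)) : Decidable (Spec_lengthStats text out) := by unfold Spec_lengthStats; infer_instance

-- ===== CLAIM =====
def Claim_equal_lengthStats : Prop := ∀ (text : String), Dom_lengthStats text → Spec_lengthStats text (lengthStats text)

-- ===== LEMMAS AND PROOFS =====
theorem altItems_eq (ls : List Int) :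
    ((PySem.List.dedup ls).foldl
      (fun d n => d.insert n ((PySem.List.count ls n : Int)))
      (PySem.Dict.empty : PySem.Dict Int Int)).items
    = (PySem.Set.ofList ls).map (fun k => (k, (ls.count k : Int))) := by
  have h := PySem.Dict.items_foldl_insert_fresh (l := PySem.List.dedup ls)
      (d := (PySem.Dict.empty : PySem.Dict Int Int))
      (k := fun n => n) (v := fun n => (PySem.List.count ls n : Int))
      (by intro a _; exact PySem.Dict.contains_empty a)
      (by simpa using PySem.List.nodup_dedup ls)
  simp [PySem.List.count_eq] at h ⊢
  exact h

theorem foldA_eq (text : String) :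
    (PySem.Str.split₀ text).foldl
      (fun d w =>
        if d.contains (PySem.Str.len w) then
          d.insert (PySem.Str.len w) (d.getD (PySem.Str.len w) 0 + 1)
        else
          d.insert (PySem.Str.len w) 1)
      (PySem.Dict.empty : PySem.Dict Int Int)
    = ((PySem.Str.split₀ text).map (fun w => PySem.Str.len w)).foldl
        (fun d k => if d.contains k then d.insert k (d.getD k 0 + 1) else d.insert k 1)
        PySem.Dict.empty := by
  rw [List.foldl_map]

theorem counterFold_eq (ls : List Int) :
    ls.foldl
      (fun d k => if d.contains k then d.insert k (d.getD k 0 + 1) else d.insert k 1)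
      (PySem.Dict.empty : PySem.Dict Int Int)
    = PySem.Dict.counter ls := by
  have hfun : (fun (d : PySem.Dict Int Int) (k : Int) =>
      if d.contains k then d.insert k (d.getD k 0 + 1) else d.insert k 1)
    = fun d k => d.insert k (d.getD k 0 + 1) := by
    funext d k
    by_cases h : d.contains k
    · simp [h]
    · have h0 : d.getD k 0 = 0 :=
        PySem.Dict.getD_of_not_contains d 0 (by simpa using h)
      rw [if_neg (by simp [h]), h0]
      norm_num
  rw [hfun, PySem.Dict.foldl_insert_getD_add_one_eq_counter]

theorem lengthStats_eq (text : String) : lengthStats text = lengthStats_alt text := by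
  show ((PySem.Str.split₀ text).foldl
      (fun d w =>
        if d.contains (PySem.Str.len w) then
          d.insert (PySem.Str.len w) (d.getD (PySem.Str.len w) 0 + 1)
        else
          d.insert (PySem.Str.len w) 1)
      (PySem.Dict.empty : PySem.Dict Int Int)).items
    = ((PySem.List.dedup ((PySem.Str.split₀ text).map (fun w => PySem.Str.len w))).foldl
        (fun d n => d.insert n
          ((PySem.List.count ((PySem.Str.split₀ text).map (fun w => PySem.Str.len w)) n : Int)))
        (PySem.Dict.empty : PySem.Dict Int Int)).items
  rw [foldA_eq text, counterFold_eq, PySem.Dict.items_counter, altItems_eq]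

-- ===== VERDICT =====
theorem lengthStats_spec : Claim_equal_lengthStats := by
  intro text _
  unfold Spec_lengthStats
  exact lengthStats_eq text
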